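-- pv_equiv track=rewrite | github.com/miffalce/qbot | src/plugins/nonebot_plugin_spam/db.py | get_rule_set
-- ===== SOURCE A (Python) =====
-- def get_rule_set(col_name):
--     res = [col_name]
--
--     def inner_(col_name, index=1):
--         if len(col_name) == index:
--             return ""
--         if col_name[index] == "_":
--             for i in ["_", "."]:
--                 col_name = str(col_name[:index]) + i + str(col_name[index + 1 :])
--                 res.append(col_name)
--         inner_(col_name, index + 1)
--
--     inner_(col_name)
--     return list(sorted(set(res), key=res.index))
-- ===== SOURCE B (Python) =====
-- def get_rule_set(col_name):
--     res = [col_name]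
--     s = col_name
--     for i in range(1, len(col_name)):
--         if s[i] == "_":
--             s = s[:i] + "." + s[i + 1 :]
--             res.append(s)
--     return list(dict.fromkeys(res))
-- ===== Notes on version B (the rewrite author's own statement) =====
-- stated objective: simpler
-- what changed: Replaces A's nested recursive closure (which appends a redundant unchanged copy plus the dot-rewrite for every underscore and then dedups via sorted(set(res), key=res.index)) with a single flat for-loop over the indices that appends only each new dot-variant, deduplicated with dict.fromkeys.
-- outside the precondition, e.g. on get_rule_set(''): A raises IndexError, B returns ['']
-- crash fix: On the empty string A raises IndexError (the inner recursion indexes position 1); B returns a singleton list holding the empty string. — e.g. on get_rule_set(""): A raises IndexError, B returns [""]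
import Mathlib
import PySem

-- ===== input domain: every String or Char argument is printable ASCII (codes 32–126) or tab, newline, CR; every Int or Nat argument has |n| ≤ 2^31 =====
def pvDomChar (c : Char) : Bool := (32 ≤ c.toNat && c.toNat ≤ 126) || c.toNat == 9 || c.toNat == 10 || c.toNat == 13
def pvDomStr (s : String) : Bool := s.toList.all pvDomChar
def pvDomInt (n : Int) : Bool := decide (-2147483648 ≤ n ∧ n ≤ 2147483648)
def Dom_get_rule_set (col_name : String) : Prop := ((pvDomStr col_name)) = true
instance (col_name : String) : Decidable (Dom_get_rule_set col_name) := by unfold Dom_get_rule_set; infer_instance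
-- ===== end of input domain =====

-- B replaces A's nested recursive closure (which appends a redundant unchanged copy plus the dot-variant
-- per underscore, then dedups via sorted(set(res), key=res.index)) by one flat indexed loop appending only
-- each new dot-variant, deduplicated with dict.fromkeys — simpler, same return value on every nonempty string.

-- ===== PORT A =====
-- s[:i] + c + s[i+1:]  (= PySem.List.slice_to_natCast / slice_from_natCast values), used by both ports
def pyRepl {α : Type} (l : List α) (i : Nat) (c : α) : List α := l.take i ++ [c] ++ l.drop (i + 1)

-- needed by innerA's termination proof
theorem pyRepl_length {α : Type} {l : List α} {i : Nat} (c : α) (h : i < l.length) :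
    (pyRepl l i c).length = l.length := by
  simp [pyRepl]; omega

-- the closure inner_(col_name, index) with the accumulated res threaded explicitly
def innerA (col : List Char) (index : Nat) (res : List (List Char)) : List (List Char) :=
  if col.length = index then res
  else if hlt : index < col.length then
    if col[index] = '_' then
      -- for i in ["_", "."]: col_name = col_name[:index] + i + col_name[index+1:]; res.append(col_name)
      innerA (pyRepl (pyRepl col index '_') index '.') (index + 1)
        (res ++ [pyRepl col index '_', pyRepl (pyRepl col index '_') index '.'])
    else innerA col (index + 1) res
  else res  -- col_name[index] raises IndexError here (only reachable for col_name = "", outside Pre_)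
termination_by col.length - index
decreasing_by
  · have h1 := pyRepl_length (l := col) '_' hlt
    have h2 := pyRepl_length (l := pyRepl col index '_') '.' (by rw [h1]; exact hlt)
    omega
  · omega

def get_rule_set (col_name : String) : List String :=
  let res := innerA col_name.toList 1 [col_name.toList]
  -- list(sorted(set(res), key=res.index)): res.index is only applied to members of res, where it returns
  -- the first-occurrence position; (PySem.List.index? res x).getD 0 is that value exactly there.
  (PySem.List.sorted (PySem.Set.ofList res) (fun x => (PySem.List.index? res x).getD 0)).map String.ofList

-- ===== PORT B =====
-- the loop body: if s[i] == "_": s = s[:i] + "." + s[i+1:]; res.append(s)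
def bstep (st : List Char × List (List Char)) (i : Nat) : List Char × List (List Char) :=
  if _h : i < st.1.length then
    if st.1[i] = '_' then (pyRepl st.1 i '.', st.2 ++ [pyRepl st.1 i '.'])
    else st
  else st  -- s[i] would raise; unreachable: every loop index satisfies i < len(col_name) = len(s)

def get_rule_set_alt (col_name : String) : List String :=
  -- for i in range(1, len(col_name)): …  over state (s, res), then list(dict.fromkeys(res))
  let st := (List.range' 1 (col_name.toList.length - 1)).foldl bstep (col_name.toList, [col_name.toList])
  (PySem.List.dedup st.2).map String.ofList

-- ===== PRECONDITION & SPEC =====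
-- Pre_ excludes only the empty string, on which A's inner recursion evaluates col_name[1] and raises IndexError.
def Pre_get_rule_set (col_name : String) : Prop := col_name ≠ ""
instance (col_name : String) : Decidable (Pre_get_rule_set col_name) := by unfold Pre_get_rule_set; infer_instance
def pvWitness_get_rule_set : String := "a_b"

-- On the empty string A raises IndexError (col_name[1] in the inner recursion); B returns [''].
def Raises_get_rule_set (col_name : String) : Prop := col_name = ""
instance (col_name : String) : Decidable (Raises_get_rule_set col_name) := by unfold Raises_get_rule_set; infer_instance
def pvRaiseWitness_get_rule_set : String := ""
def pvRaiseWitnessOut_get_rule_set : List String := [""]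

def Spec_get_rule_set (col_name : String) (out : List String) : Prop := out = get_rule_set_alt col_name
instance (col_name : String) (out : List String) : Decidable (Spec_get_rule_set col_name out) := by unfold Spec_get_rule_set; infer_instance

-- ===== CLAIM (what is proved, stated in full; the proofs are below) =====
def Claim_equal_get_rule_set : Prop := ∀ (col_name : String), Dom_get_rule_set col_name → Pre_get_rule_set col_name → Spec_get_rule_set col_name (get_rule_set col_name)
def Claim_raises_get_rule_set : Prop := (∀ (col_name : String), Dom_get_rule_set col_name → Raises_get_rule_set col_name → ¬ Pre_get_rule_set col_name) ∧ (Dom_get_rule_set (pvRaiseWitness_get_rule_set) ∧ Raises_get_rule_set (pvRaiseWitness_get_rule_set) ∧ get_rule_set_alt (pvRaiseWitness_get_rule_set) = pvRaiseWitnessOut_get_rule_set)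

-- ===== LEMMAS AND PROOFS =====

-- replacing position i by the character already there is the identity
theorem pyRepl_eq_self {α : Type} {l : List α} {i : Nat} {c : α} (hi : i < l.length)
    (hc : l[i] = c) : pyRepl l i c = l := by
  calc l.take i ++ [c] ++ l.drop (i + 1)
      = l.take i ++ (c :: l.drop (i + 1)) := by simp
    _ = l.take i ++ l.drop i := by rw [← hc, ← List.drop_eq_getElem_cons hi]
    _ = l := List.take_append_drop i l

-- innerA only appends to res
theorem innerA_append : ∀ (k : Nat) (col : List Char) (i : Nat), k = col.length - i →
    ∀ (r1 r2 : List (List Char)), innerA col i (r1 ++ r2) = r1 ++ innerA col i r2 := by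
  intro k
  induction k with
  | zero =>
    intro col i hk r1 r2
    conv_lhs => rw [innerA]
    conv_rhs => rw [innerA]
    by_cases h : col.length = i
    · simp [h]
    · have h2 : ¬ i < col.length := by omega
      simp [h, h2]
  | succ k ih =>
    intro col i hk r1 r2
    have hi : i < col.length := by omega
    have hne : ¬ col.length = i := by omega
    conv_lhs => rw [innerA]
    conv_rhs => rw [innerA]
    rw [if_neg hne, if_neg hne, dif_pos hi, dif_pos hi]
    by_cases hu : col[i] = '_'
    · rw [if_pos hu, if_pos hu, List.append_assoc]
      exact ih (pyRepl (pyRepl col i '_') i '.') (i + 1)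
        (by rw [pyRepl_length '.' (by rw [pyRepl_length '_' hi]; exact hi), pyRepl_length '_' hi]; omega)
        r1 (r2 ++ [pyRepl col i '_', pyRepl (pyRepl col i '_') i '.'])
    · rw [if_neg hu, if_neg hu]
      exact ih col (i + 1) (by omega) r1 r2

-- appending an element that already occurs earlier does not change the set built in first-occurrence order
theorem ofList_append_cons_of_mem {α : Type} [BEq α] [LawfulBEq α] {x : α} {xs zs : List α}
    (h : x ∈ xs) : PySem.Set.ofList (xs ++ x :: zs) = PySem.Set.ofList (xs ++ zs) := by
  rw [PySem.Set.ofList_append, PySem.Set.ofList_append, PySem.Set.update_cons]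
  have hc : (PySem.Set.ofList xs).contains x = true :=
    (PySem.Set.contains_iff _ _).mpr ((PySem.Set.mem_ofList xs x).mpr h)
  simp [PySem.Set.add, h]

-- first-occurrence indices are strictly increasing along set(xs)'s first-occurrence order
theorem pairwise_index_ofList {α : Type} [BEq α] [LawfulBEq α] (xs : List α) :
    (PySem.Set.ofList xs).Pairwise
      (fun a b => (PySem.List.index? xs a).getD 0 < (PySem.List.index? xs b).getD 0) := by
  induction xs with
  | nil => simp [PySem.Set.ofList_nil]
  | cons x xs ih =>
    rw [PySem.Set.ofList_cons]
    constructor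
    · intro b hb
      obtain ⟨hb1, hbx⟩ := (PySem.Set.mem_discard _ _ _).mp hb
      have hbxs : b ∈ xs := (PySem.Set.mem_ofList _ _).mp hb1
      obtain ⟨k, hk⟩ : ∃ k, PySem.List.index? xs b = some k := by
        cases hc : PySem.List.index? xs b with
        | none => exact absurd ((PySem.List.index?_eq_none_iff _ _).mp hc) (by simpa using hbxs)
        | some k => exact ⟨k, rfl⟩
      rw [PySem.List.index?_cons_self, PySem.List.index?_cons_of_ne xs (Ne.symm hbx), hk]
      simp
    · have hsub : List.Sublist ((PySem.Set.ofList xs).discard x) (PySem.Set.ofList xs) := by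
        simpa [PySem.Set.discard] using List.filter_sublist (l := PySem.Set.ofList xs)
          (p := fun y => !y == x)
      refine (ih.sublist hsub).imp_of_mem ?_
      intro a b ha hb hr
      obtain ⟨ha1, hax⟩ := (PySem.Set.mem_discard _ _ _).mp ha
      obtain ⟨hb1, hbx⟩ := (PySem.Set.mem_discard _ _ _).mp hb
      have haxs : a ∈ xs := (PySem.Set.mem_ofList _ _).mp ha1
      have hbxs : b ∈ xs := (PySem.Set.mem_ofList _ _).mp hb1
      obtain ⟨ka, hka⟩ : ∃ k, PySem.List.index? xs a = some k := by
        cases hc : PySem.List.index? xs a with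
        | none => exact absurd ((PySem.List.index?_eq_none_iff _ _).mp hc) (by simpa using haxs)
        | some k => exact ⟨k, rfl⟩
      obtain ⟨kb, hkb⟩ : ∃ k, PySem.List.index? xs b = some k := by
        cases hc : PySem.List.index? xs b with
        | none => exact absurd ((PySem.List.index?_eq_none_iff _ _).mp hc) (by simpa using hbxs)
        | some k => exact ⟨k, rfl⟩
      rw [PySem.List.index?_cons_of_ne xs (Ne.symm hax),
          PySem.List.index?_cons_of_ne xs (Ne.symm hbx), hka, hkb]
      rw [hka, hkb] at hr
      simpa using hr

-- sorting set(res) by first-occurrence index is the identity on its first-occurrence order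
theorem sorted_index_ofList {α : Type} [BEq α] [LawfulBEq α] (xs : List α) :
    PySem.List.sorted (PySem.Set.ofList xs) (fun x => (PySem.List.index? xs x).getD 0) =
      PySem.Set.ofList xs :=
  PySem.List.sorted_eq_of_perm_of_pairwise_lt _ _ _ (List.Perm.refl _) (pairwise_index_ofList xs)

-- the two loops accumulate the same set of variants, in the same first-occurrence order
theorem innerA_bstep_ofList : ∀ (k : Nat) (col : List Char) (i : Nat) (res : List (List Char)),
    col ∈ res → k = col.length - i →
    PySem.Set.ofList (innerA col i res) =
      PySem.Set.ofList (((List.range' i k).foldl bstep (col, res)).2) := by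
  intro k
  induction k with
  | zero =>
    intro col i res _ hk
    rw [innerA]
    by_cases h : col.length = i
    · simp [h]
    · have : ¬ i < col.length := by omega
      simp [h, this]
  | succ k ih =>
    intro col i res hmem hk
    have hi : i < col.length := by omega
    rw [List.range'_succ, List.foldl_cons, innerA, if_neg (by omega), dif_pos hi, bstep]
    simp only [dif_pos hi]
    by_cases hu : col[i] = '_'
    · rw [if_pos hu, if_pos hu]
      rw [pyRepl_eq_self hi hu]
      have hlen : (pyRepl col i '.').length = col.length := pyRepl_length '.' hi
      have hA : innerA (pyRepl col i '.') (i + 1) (res ++ [col, pyRepl col i '.']) =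
          res ++ col :: innerA (pyRepl col i '.') (i + 1) [pyRepl col i '.'] := by
        have := innerA_append k (pyRepl col i '.') (i + 1) (by rw [hlen]; omega)
          (res ++ [col]) [pyRepl col i '.']
        simpa using this
      have hB : innerA (pyRepl col i '.') (i + 1) (res ++ [pyRepl col i '.']) =
          res ++ innerA (pyRepl col i '.') (i + 1) [pyRepl col i '.'] :=
        innerA_append k (pyRepl col i '.') (i + 1) (by rw [hlen]; omega) res [pyRepl col i '.']
      rw [hA, ofList_append_cons_of_mem hmem, ← hB]
      exact ih (pyRepl col i '.') (i + 1) (res ++ [pyRepl col i '.']) (by simp) (by omega)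
    · rw [if_neg hu, if_neg hu]
      exact ih col (i + 1) res hmem (by omega)

-- ===== VERDICT (by name: the statement is the Claim_ definition above) =====
theorem get_rule_set_spec : Claim_equal_get_rule_set := by
  intro col_name _ _
  show get_rule_set col_name = get_rule_set_alt col_name
  simp only [get_rule_set, get_rule_set_alt]
  rw [sorted_index_ofList, PySem.List.dedup_eq_ofList]
  congr 1
  exact innerA_bstep_ofList (col_name.toList.length - 1) col_name.toList 1 [col_name.toList]
    (by simp) rfl

@[simp] theorem get_rule_set_raises : Claim_raises_get_rule_set := by
  unfold Claim_raises_get_rule_set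
  exact ⟨fun c _ hr hp => hp hr, by decide⟩
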